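-- pv_equiv track=rewrite | github.com/KimJiwon0501/Cube-Solver-with-Python | move_optimizer.py | process_with_shortening
-- ===== SOURCE A (Python) =====
-- def shorten_solution(segment):
--     y_count = segment.count("y")
--     y_prime_count = segment.count("y\'")
--     U_count = segment.count("U")
--     U_prime_count = segment.count("U\'")
--
--     result = []
--
--     # 'y' 최적화
--     y = y_count - y_prime_count
--     if y < 0:
--         y = -y
--         if y >= 4:
--             y = y % 4
--         if y == 1:
--             result.append("y\'")
--         elif y == 2:
--             result.append("y\'")
--             result.append("y\'")
--         elif y == 3:
--             result.append("y")
--     else: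
--         if y >= 4:
--             y = y % 4
--         if y == 1:
--             result.append("y")
--         elif y == 2:
--             result.append("y")
--             result.append("y")
--         elif y == 3:
--             result.append("y\'")
--
--     # 'U' 최적화
--     U = U_count - U_prime_count
--     if U < 0:
--         U = -U
--         if U >= 4:
--             U = U % 4
--         if U == 1:
--             result.append("U\'")
--         elif U == 2:
--             result.append("U\'")
--             result.append("U\'")
--         elif U == 3:
--             result.append("U")
--     else:
--         if U >= 4:
--             U = U % 4
--         if U == 1:
--             result.append("U")
--         elif U == 2:
--             result.append("U")
--             result.append("U")
--         elif U == 3: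
--             result.append("U\'")
--
--     return result
--
-- def split_by_target(seq, targets={"y", "y'", "U", "U'"}):
--     if not seq:
--         return []
--
--     result = []
--     current = [seq[0]]
--     in_target = seq[0] in targets
--
--     for move in seq[1:]:
--         now_target = move in targets
--         if now_target == in_target:
--             current.append(move)
--         else:
--             result.append(current)
--             current = [move]
--             in_target = now_target
--
--     result.append(current)
--     return result
--
-- def process_with_shortening(moves, targets={"y", "y'", "U", "U'"}):
--     segments = split_by_target(moves, targets)
--     result = []
--
--     for segment in segments:
--         if segment[0] in targets:
--             result.extend(shorten_solution(segment))
--         else: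
--             result.extend(segment)
--
--     return result
-- ===== SOURCE B (Python) =====
-- # Single pass with running net counters for y and U, flushed at each non-target move.
-- def _flush(net, plus, minus):
--     m = abs(net) % 4
--     if m == 0:
--         return []
--     if m == 1:
--         return [plus] if net > 0 else [minus]
--     if m == 2:
--         return [plus, plus] if net > 0 else [minus, minus]
--     return [minus] if net > 0 else [plus]
--
-- def process_with_shortening(moves, targets={"y", "y'", "U", "U'"}):
--     result = []
--     ny = nu = 0
--     for move in moves:
--         if move in targets:
--             if move == "y":
--                 ny += 1
--             elif move == "y'":
--                 ny -= 1
--             elif move == "U":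
--                 nu += 1
--             elif move == "U'":
--                 nu -= 1
--         else:
--             result += _flush(ny, "y", "y'") + _flush(nu, "U", "U'")
--             ny = nu = 0
--             result.append(move)
--     result += _flush(ny, "y", "y'") + _flush(nu, "U", "U'")
--     return result
-- ===== Notes on version B (the rewrite author's own statement) =====
-- stated objective: simpler
-- what changed: Replaces split-into-alternating-segments plus four list.count passes per segment by a single pass over moves with running net-y and net-U integer counters that are flushed to canonical moves at each non-target move and at the end.
import Mathlib
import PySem

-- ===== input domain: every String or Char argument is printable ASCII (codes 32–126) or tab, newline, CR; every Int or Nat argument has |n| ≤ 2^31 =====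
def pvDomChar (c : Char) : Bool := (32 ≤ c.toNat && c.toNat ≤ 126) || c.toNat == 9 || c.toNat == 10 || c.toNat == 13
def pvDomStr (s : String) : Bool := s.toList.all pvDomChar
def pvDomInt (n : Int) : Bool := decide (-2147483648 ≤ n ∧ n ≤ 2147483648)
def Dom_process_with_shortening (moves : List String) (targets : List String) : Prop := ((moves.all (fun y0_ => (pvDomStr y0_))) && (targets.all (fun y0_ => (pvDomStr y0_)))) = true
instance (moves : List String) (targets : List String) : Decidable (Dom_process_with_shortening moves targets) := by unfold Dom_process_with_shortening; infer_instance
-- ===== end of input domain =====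

-- B replaces split-into-segments + four .count passes per segment by ONE pass over the
-- moves with running net y / net U counters flushed at each non-target move (objective:
-- simpler / single pass).

-- ===== PORT A =====
-- helper of A: shorten one all-target segment by counting y/y'/U/U'
def shorten_solution (segment : List String) : List String :=
  let y_count : Int := PySem.List.count segment "y"
  let y_prime_count : Int := PySem.List.count segment "y'"
  let U_count : Int := PySem.List.count segment "U"
  let U_prime_count : Int := PySem.List.count segment "U'"
  let result : List String := []
  let y := y_count - y_prime_count
  let result :=
    if y < 0 then
      let y := -y
      let y := if y ≥ 4 then PySem.Int.mod y 4 else y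
      if y == 1 then result ++ ["y'"]
      else if y == 2 then result ++ ["y'", "y'"]
      else if y == 3 then result ++ ["y"]
      else result
    else
      let y := if y ≥ 4 then PySem.Int.mod y 4 else y
      if y == 1 then result ++ ["y"]
      else if y == 2 then result ++ ["y", "y"]
      else if y == 3 then result ++ ["y'"]
      else result
  let U := U_count - U_prime_count
  let result :=
    if U < 0 then
      let U := -U
      let U := if U ≥ 4 then PySem.Int.mod U 4 else U
      if U == 1 then result ++ ["U'"]
      else if U == 2 then result ++ ["U'", "U'"]
      else if U == 3 then result ++ ["U"]
      else result
    else
      let U := if U ≥ 4 then PySem.Int.mod U 4 else U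
      if U == 1 then result ++ ["U"]
      else if U == 2 then result ++ ["U", "U"]
      else if U == 3 then result ++ ["U'"]
      else result
  result

-- the body of split_by_target's for-loop, named so the fold can be reasoned about
def pvSplitStep (targets : List String)
    (st : List (List String) × List String × Bool) (move : String) :
    List (List String) × List String × Bool :=
  let now_target := targets.contains move
  if now_target == st.2.2 then (st.1, st.2.1 ++ [move], st.2.2)
  else (st.1 ++ [st.2.1], [move], now_target)

def split_by_target (seq : List String) (targets : List String) : List (List String) :=
  match seq with
  | [] => []
  | s0 :: rest =>
    let st := rest.foldl (pvSplitStep targets) ([], [s0], targets.contains s0)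
    st.1 ++ [st.2.1]

-- 'segment[0] in targets' of A's loop body; segments produced by split_by_target are
-- never empty, so the [] case (where Python would raise IndexError) is unreachable
def pvProcSeg (targets : List String) (segment : List String) : List String :=
  match segment with
  | [] => []
  | x :: _ => if targets.contains x then shorten_solution segment else segment

def process_with_shortening (moves : List String) (targets : List String) : List String :=
  let segments := split_by_target moves targets
  segments.foldl (fun result segment => result ++ pvProcSeg targets segment) []

-- ===== PORT B =====
-- emit the canonical moves for a net count (Source B's _flush)
def pvFlush (net : Int) (plus minus : String) : List String :=
  if PySem.Int.mod |net| 4 == 0 then []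
  else if PySem.Int.mod |net| 4 == 1 then (if net > 0 then [plus] else [minus])
  else if PySem.Int.mod |net| 4 == 2 then (if net > 0 then [plus, plus] else [minus, minus])
  else (if net > 0 then [minus] else [plus])

-- the body of B's single for-loop, named so the fold can be reasoned about
def pvBstep (targets : List String) (st : List String × Int × Int) (move : String) :
    List String × Int × Int :=
  if targets.contains move then
    if move == "y" then (st.1, st.2.1 + 1, st.2.2)
    else if move == "y'" then (st.1, st.2.1 - 1, st.2.2)
    else if move == "U" then (st.1, st.2.1, st.2.2 + 1)
    else if move == "U'" then (st.1, st.2.1, st.2.2 - 1)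
    else st
  else (st.1 ++ pvFlush st.2.1 "y" "y'" ++ pvFlush st.2.2 "U" "U'" ++ [move], 0, 0)

def process_with_shortening_alt (moves : List String) (targets : List String) : List String :=
  let st := moves.foldl (pvBstep targets) ([], 0, 0)
  st.1 ++ pvFlush st.2.1 "y" "y'" ++ pvFlush st.2.2 "U" "U'"

-- ===== PRECONDITION & SPEC =====
def Spec_process_with_shortening (moves : List String) (targets : List String) (out : List String) : Prop := out = process_with_shortening_alt moves targets
instance (moves : List String) (targets : List String) (out : List String) : Decidable (Spec_process_with_shortening moves targets out) := by unfold Spec_process_with_shortening; infer_instance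

-- ===== CLAIM (what is proved, stated in full; the proofs are below) =====
def Claim_equal_process_with_shortening : Prop := ∀ (moves : List String) (targets : List String), Dom_process_with_shortening moves targets → Spec_process_with_shortening moves targets (process_with_shortening moves targets)

-- ===== LEMMAS AND PROOFS =====

-- net y / net U counts of a segment (proof bookkeeping only)
def pvNetY (seg : List String) : Int :=
  (PySem.List.count seg "y" : Int) - (PySem.List.count seg "y'" : Int)
def pvNetU (seg : List String) : Int :=
  (PySem.List.count seg "U" : Int) - (PySem.List.count seg "U'" : Int)

-- B's run, starting from empty output with given net counters
def pvBfin (targets : List String) (ny nu : Int) (ms : List String) : List String :=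
  let st := ms.foldl (pvBstep targets) ([], ny, nu)
  st.1 ++ pvFlush st.2.1 "y" "y'" ++ pvFlush st.2.2 "U" "U'"

theorem pvFlush_zero (p q : String) : pvFlush 0 p q = [] := rfl

-- each sign-split branch block of shorten_solution appends pvFlush to the output so far
theorem pvBlock_eq_flush (r : List String) (n : Int) (p q : String) :
    (if n < 0 then
      if ((if -n ≥ 4 then PySem.Int.mod (-n) 4 else -n) == 1) then r ++ [q]
      else if ((if -n ≥ 4 then PySem.Int.mod (-n) 4 else -n) == 2) then r ++ [q, q]
      else if ((if -n ≥ 4 then PySem.Int.mod (-n) 4 else -n) == 3) then r ++ [p]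
      else r
    else
      if ((if n ≥ 4 then PySem.Int.mod n 4 else n) == 1) then r ++ [p]
      else if ((if n ≥ 4 then PySem.Int.mod n 4 else n) == 2) then r ++ [p, p]
      else if ((if n ≥ 4 then PySem.Int.mod n 4 else n) == 3) then r ++ [q]
      else r) = r ++ pvFlush n p q := by
  unfold pvFlush
  by_cases hn : n < 0
  · have habs : |n| = -n := abs_of_neg hn
    rw [if_pos hn, habs]
    have hnp : ¬ n > 0 := by omega
    by_cases hge : -n ≥ 4
    · rw [if_pos hge, PySem.Int.mod_eq_emod_of_pos (show (0:Int) < 4 by norm_num)]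
      have h0 : 0 ≤ (-n) % 4 := Int.emod_nonneg _ (by norm_num)
      have h4 : (-n) % 4 < 4 := Int.emod_lt_of_pos _ (by norm_num)
      interval_cases h : ((-n) % 4) <;> simp [hnp]
    · rw [if_neg hge, PySem.Int.mod_eq_emod_of_pos (show (0:Int) < 4 by norm_num)]
      have heq : (-n) % 4 = -n := Int.emod_eq_of_lt (by omega) (by omega)
      rw [heq]
      have h1 : 0 < -n := by omega
      interval_cases h : (-n) <;> simp [hnp]
  · have h0n : 0 ≤ n := by omega
    have habs : |n| = n := abs_of_nonneg h0n
    rw [if_neg hn, habs]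
    by_cases hge : n ≥ 4
    · rw [if_pos hge, PySem.Int.mod_eq_emod_of_pos (show (0:Int) < 4 by norm_num)]
      have h0 : 0 ≤ n % 4 := Int.emod_nonneg _ (by norm_num)
      have h4 : n % 4 < 4 := Int.emod_lt_of_pos _ (by norm_num)
      have hp : 4 ≤ n := hge
      interval_cases h : (n % 4) <;> simp [show n > 0 by omega]
    · rw [if_neg hge, PySem.Int.mod_eq_emod_of_pos (show (0:Int) < 4 by norm_num)]
      have heq : n % 4 = n := Int.emod_eq_of_lt (by omega) (by omega)
      rw [heq]
      interval_cases n <;> simp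

theorem shorten_eq_flush (seg : List String) :
    shorten_solution seg = pvFlush (pvNetY seg) "y" "y'" ++ pvFlush (pvNetU seg) "U" "U'" := by
  simp only [shorten_solution, pvNetY, pvNetU]
  rw [pvBlock_eq_flush, pvBlock_eq_flush]
  simp

theorem pvBstep_target (targets : List String) (acc : List String) (ny nu : Int)
    (m : String) (hm : targets.contains m = true) :
    pvBstep targets (acc, ny, nu) m = (acc, ny + pvNetY [m], nu + pvNetU [m]) := by
  unfold pvBstep pvNetY pvNetU
  rw [hm]
  by_cases h1 : m = "y"
  · subst h1; simp [PySem.List.count]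
  · by_cases h2 : m = "y'"
    · subst h2; simp [PySem.List.count]; omega
    · by_cases h3 : m = "U"
      · subst h3; simp [PySem.List.count]
      · by_cases h4 : m = "U'"
        · subst h4; simp [PySem.List.count]; omega
        · simp [PySem.List.count_eq, h1, h2, h3, h4,
            (by simpa using h1 : ¬ (m == "y") = true),
            (by simpa using h2 : ¬ (m == "y'") = true),
            (by simpa using h3 : ¬ (m == "U") = true),
            (by simpa using h4 : ¬ (m == "U'") = true)]

theorem pvNet_append (cur : List String) (m : String) :
    pvNetY (cur ++ [m]) = pvNetY cur + pvNetY [m] ∧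
    pvNetU (cur ++ [m]) = pvNetU cur + pvNetU [m] := by
  unfold pvNetY pvNetU
  simp [PySem.List.count_eq, List.count_append]
  omega

-- unfolding one step of pvBfin at a target move
theorem pvBfin_cons_target (targets : List String) (ny nu : Int) (m : String)
    (ms : List String) (hm : targets.contains m = true) :
    pvBfin targets ny nu (m :: ms) =
      pvBfin targets (ny + pvNetY [m]) (nu + pvNetU [m]) ms := by
  conv_lhs => rw [pvBfin]
  simp only [List.foldl_cons]
  rw [pvBstep_target targets [] ny nu m hm]
  rfl

-- B's fold only appends to the output component
theorem pvBfin_shift (targets : List String) :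
    ∀ (ms : List String) (acc : List String) (ny nu : Int),
    (let st := ms.foldl (pvBstep targets) (acc, ny, nu)
     st.1 ++ pvFlush st.2.1 "y" "y'" ++ pvFlush st.2.2 "U" "U'") =
      acc ++ pvBfin targets ny nu ms := by
  intro ms
  induction ms with
  | nil => intro acc ny nu; simp [pvBfin]
  | cons m ms ih =>
    intro acc ny nu
    simp only [List.foldl_cons]
    by_cases hm : targets.contains m = true
    · rw [pvBstep_target targets acc ny nu m hm, ih,
          pvBfin_cons_target targets ny nu m ms hm]
    · have h1 : pvBstep targets (acc, ny, nu) m =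
          (acc ++ pvFlush ny "y" "y'" ++ pvFlush nu "U" "U'" ++ [m], 0, 0) := by
        unfold pvBstep; rw [if_neg hm]
      have h2 : pvBstep targets (([] : List String), ny, nu) m =
          ([] ++ pvFlush ny "y" "y'" ++ pvFlush nu "U" "U'" ++ [m], 0, 0) := by
        unfold pvBstep; rw [if_neg hm]
      rw [h1, ih]
      conv_rhs => rw [pvBfin]
      simp only [List.foldl_cons]
      rw [h2, ih]
      simp

theorem pvBfin_cons_nontarget (targets : List String) (ny nu : Int) (m : String)
    (ms : List String) (hm : ¬ targets.contains m = true) :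
    pvBfin targets ny nu (m :: ms) =
      pvFlush ny "y" "y'" ++ pvFlush nu "U" "U'" ++ [m] ++ pvBfin targets 0 0 ms := by
  conv_lhs => rw [pvBfin]
  simp only [List.foldl_cons]
  have h2 : pvBstep targets (([] : List String), ny, nu) m =
      ([] ++ pvFlush ny "y" "y'" ++ pvFlush nu "U" "U'" ++ [m], 0, 0) := by
    unfold pvBstep; rw [if_neg hm]
  rw [h2, pvBfin_shift]
  simp

-- processing a whole target segment equals B's flush of its nets
theorem pvProcSeg_target (targets : List String) (seg : List String)
    (hne : seg ≠ []) (hall : ∀ x ∈ seg, targets.contains x = true) :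
    pvProcSeg targets seg = pvFlush (pvNetY seg) "y" "y'" ++ pvFlush (pvNetU seg) "U" "U'" := by
  cases seg with
  | nil => exact absurd rfl hne
  | cons x rest =>
    rw [show pvProcSeg targets (x :: rest) =
          if targets.contains x = true then shorten_solution (x :: rest) else x :: rest from rfl,
        if_pos (hall x (by simp)), shorten_eq_flush]

theorem pvProcSeg_nontarget (targets : List String) (seg : List String)
    (hne : seg ≠ []) (hall : ∀ x ∈ seg, targets.contains x = false) :
    pvProcSeg targets seg = seg := by
  cases seg with
  | nil => exact absurd rfl hne
  | cons x rest =>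
    rw [show pvProcSeg targets (x :: rest) =
          if targets.contains x = true then shorten_solution (x :: rest) else x :: rest from rfl,
        if_neg (by simpa using hall x (by simp))]

-- MAIN INVARIANT: the processed output of A's remaining split fold equals the
-- already-emitted segments plus B's run over the rest, seeded with the nets of
-- the current (uniform) segment.
theorem pvMain (targets : List String) :
    ∀ (rest : List String) (segs : List (List String)) (cur : List String) (flag : Bool),
    cur ≠ [] → (∀ x ∈ cur, targets.contains x = flag) →
    (let st := rest.foldl (pvSplitStep targets) (segs, cur, flag)
     (st.1 ++ [st.2.1]).flatMap (pvProcSeg targets)) =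
      segs.flatMap (pvProcSeg targets) ++
        (if flag then pvBfin targets (pvNetY cur) (pvNetU cur) rest
         else cur ++ pvBfin targets 0 0 rest) := by
  intro rest
  induction rest with
  | nil =>
    intro segs cur flag hne hall
    simp only [List.foldl_nil, List.flatMap_append, List.flatMap_cons, List.flatMap_nil]
    cases flag with
    | true =>
      rw [pvProcSeg_target targets cur hne hall]
      simp [pvBfin]
    | false =>
      rw [pvProcSeg_nontarget targets cur hne hall]
      simp [pvBfin, pvFlush_zero]
  | cons m rest ih =>
    intro segs cur flag hne hall
    simp only [List.foldl_cons]
    by_cases hsame : targets.contains m = flag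
    · have hstep : pvSplitStep targets (segs, cur, flag) m = (segs, cur ++ [m], flag) := by
        unfold pvSplitStep; rw [if_pos (by simpa using hsame)]
      rw [hstep, ih segs (cur ++ [m]) flag (by simp)
        (by intro x hx; rcases List.mem_append.mp hx with h | h
            · exact hall x h
            · simp at h; subst h; exact hsame)]
      cases flag with
      | true =>
        rw [pvBfin_cons_target targets _ _ m rest hsame,
            (pvNet_append cur m).1, (pvNet_append cur m).2]
        simp
      | false =>
        rw [pvBfin_cons_nontarget targets 0 0 m rest (by simpa using hsame),
            pvFlush_zero, pvFlush_zero]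
        simp
    · have hstep : pvSplitStep targets (segs, cur, flag) m =
          (segs ++ [cur], [m], targets.contains m) := by
        unfold pvSplitStep; rw [if_neg (by simpa using hsame)]
      rw [hstep, ih (segs ++ [cur]) [m] (targets.contains m) (by simp) (by simp)]
      cases flag with
      | true =>
        have hm : targets.contains m = false := by
          cases h : targets.contains m <;> simp_all
        rw [hm]
        simp only [Bool.false_eq_true, if_false, if_true]
        rw [pvBfin_cons_nontarget targets _ _ m rest (by simpa using hm),
            List.flatMap_append, List.flatMap_cons, List.flatMap_nil,
            pvProcSeg_target targets cur hne hall]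
        simp
      | false =>
        have hm : targets.contains m = true := by
          cases h : targets.contains m <;> simp_all
        rw [hm]
        simp only [if_true, Bool.false_eq_true, if_false]
        rw [pvBfin_cons_target targets 0 0 m rest hm,
            List.flatMap_append, List.flatMap_cons, List.flatMap_nil,
            pvProcSeg_nontarget targets cur hne hall]
        simp

-- ===== VERDICT (by name: the statement is the Claim_ definition above) =====
theorem process_with_shortening_spec : Claim_equal_process_with_shortening := by
  intro moves targets _
  unfold Spec_process_with_shortening process_with_shortening process_with_shortening_alt
  cases moves with
  | nil => simp [split_by_target, pvFlush_zero]
  | cons s0 rest =>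
    unfold split_by_target
    rw [PySem.List.foldl_append_eq_flatMap (pvProcSeg targets)]
    simp only [List.nil_append]
    have h := pvMain targets rest [] [s0] (targets.contains s0) (by simp) (by simp)
    simp only [List.flatMap_nil, List.nil_append] at h
    rw [h]
    have hB : (let st := (s0 :: rest).foldl (pvBstep targets) (([] : List String), 0, 0)
        st.1 ++ pvFlush st.2.1 "y" "y'" ++ pvFlush st.2.2 "U" "U'") =
        pvBfin targets 0 0 (s0 :: rest) := rfl
    rw [hB]
    cases h0 : targets.contains s0 with
    | true =>
      rw [pvBfin_cons_target targets 0 0 s0 rest h0]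
      simp
    | false =>
      rw [pvBfin_cons_nontarget targets 0 0 s0 rest (by simpa using h0)]
      simp [pvFlush_zero]
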